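-- pv_equiv track=rewrite | github.com/istudormihai/bioinformatics | LAB7/Assign1.py | find_repetitions
-- ===== SOURCE A (Python) =====
-- def find_repetitions(dna_sequence, min_length=6, max_length=10):
--     all_repetitions = {}
--     sequence_upper = dna_sequence.upper()
--
--     for length in range(min_length, max_length + 1):
--         for i in range(len(sequence_upper) - length + 1):
--             pattern = sequence_upper[i:i + length]
--             if all(nucleotide in 'ATGC' for nucleotide in pattern):
--                 if pattern not in all_repetitions:
--                     all_repetitions[pattern] = []
--                 all_repetitions[pattern].append(i)
--
--     repetitions = {pattern: positions for pattern, positions in all_repetitions.items()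
--                    if len(positions) > 1}
--
--     return repetitions
-- ===== SOURCE B (Python) =====
-- def find_repetitions(dna_sequence, min_length=6, max_length=10):
--     seq = dna_sequence.upper()
--     n = len(seq)
--     # first pass: segment seq into maximal runs of ATGC characters, as (start, text)
--     runs = []
--     j = 0
--     while j < n:
--         if seq[j] in 'ATGC':
--             k = j + 1
--             while k < n and seq[k] in 'ATGC':
--                 k += 1
--             runs.append((j, seq[j:k]))
--             j = k
--         else:
--             j += 1
--     # second pass: slide windows inside each run only (no per-window validity test)
--     groups = {}
--     for length in range(min_length, max_length + 1):
--         for start, text in runs: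
--             for off in range(len(text) - length + 1):
--                 groups.setdefault(text[off:off + length], []).append(start + off)
--     return {pattern: positions for pattern, positions in groups.items()
--             if len(positions) > 1}
-- ===== Notes on version B (the rewrite author's own statement) =====
-- stated objective: alternative
-- what changed: B first segments the sequence into maximal ATGC runs in one pass, then slides windows inside each run only, so A's per-window all()-validity scan disappears entirely.
-- outside the precondition, e.g. on find_repetitions('AX', 0, 0): A returns {'': [0, 1, 2]}, B returns {'': [0, 1]}; on find_repetitions('AXA', -1, -1): A returns {'': [1, 2, 3, 4]}, B returns {'': [0, 1, 2, 2, 3, 4]}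
import Mathlib
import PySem

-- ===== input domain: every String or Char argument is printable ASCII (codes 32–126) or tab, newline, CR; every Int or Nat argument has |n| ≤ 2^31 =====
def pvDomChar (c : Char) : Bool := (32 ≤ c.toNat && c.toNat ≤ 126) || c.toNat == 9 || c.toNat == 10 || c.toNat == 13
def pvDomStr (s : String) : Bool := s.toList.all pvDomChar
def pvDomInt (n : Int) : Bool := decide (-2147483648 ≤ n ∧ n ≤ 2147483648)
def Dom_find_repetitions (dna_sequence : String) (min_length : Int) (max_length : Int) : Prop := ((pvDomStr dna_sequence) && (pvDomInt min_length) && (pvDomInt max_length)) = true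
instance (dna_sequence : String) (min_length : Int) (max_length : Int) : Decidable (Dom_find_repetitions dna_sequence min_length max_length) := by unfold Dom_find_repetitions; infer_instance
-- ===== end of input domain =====

-- B first segments the sequence into maximal ATGC runs (one pass), then slides windows
-- inside each run only, so A's per-window all()-validity scan disappears (objective: alternative).


-- ===== PORT A =====
-- `nucleotide in 'ATGC'` on a single character (both sources contain this very test)
def pvValid (c : Char) : Bool := PySem.Chars.isIn [c] ("ATGC".toList)

-- the final dict comprehension `{p: pos for p, pos in d.items() if len(pos) > 1}`,
-- identical in both sources; the returned dict is its items list (insertion order)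
def pvFilterLong (d : PySem.Dict String (List Int)) : List (String × List Int) :=
  ((d.items.filter (fun pv => 1 < pv.2.length)).foldl
    (fun r pv => r.insert pv.1 pv.2) PySem.Dict.empty).items

-- body of A's inner loop over i (for one value of `length`)
def pvStepA (seq : List Char) (length : Int) (d : PySem.Dict String (List Int)) (i : Int) :
    PySem.Dict String (List Int) :=
  let pattern := PySem.List.slice seq (some i) (some (i + length))
  if pattern.all pvValid then
    let key := String.ofList pattern
    let d' := if d.contains key then d else d.insert key []
    d'.modify key [] (· ++ [i])
  else d

def find_repetitions (dna_sequence : String) (min_length : Int) (max_length : Int) :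
    List (String × List Int) :=
  let sequence_upper := (PySem.Str.upper dna_sequence).toList
  let n : Int := PySem.List.len sequence_upper
  let all_repetitions :=
    (PySem.List.pyRange min_length (max_length + 1) 1).foldl
      (fun d length =>
        (PySem.List.pyRange 0 (n - length + 1) 1).foldl (pvStepA sequence_upper length) d)
      PySem.Dict.empty
  pvFilterLong all_repetitions

-- ===== PORT B =====
-- `groups.setdefault(key, []).append(pos)`
def pvEmit (d : PySem.Dict String (List Int)) (key : String) (pos : Int) :
    PySem.Dict String (List Int) :=
  (d.setdefault key []).modify key [] (· ++ [pos])

-- B's first pass: the outer while loop over j; the inner `while k < n and seq[k] in 'ATGC'`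
-- scan is the maximal valid prefix, i.e. takeWhile, and `j = k` continues after it (dropWhile)
def pvRuns (j : Nat) : List Char → List (Int × List Char)
  | [] => []
  | c :: cs =>
    if h : pvValid c then
      ((j : Int), (c :: cs).takeWhile pvValid) ::
        pvRuns (j + ((c :: cs).takeWhile pvValid).length) ((c :: cs).dropWhile pvValid)
    else pvRuns (j + 1) cs
  termination_by cs => cs.length
  decreasing_by
  · simp only [List.dropWhile_cons, h, if_pos]
    have := List.length_dropWhile_le pvValid cs
    simp only [List.length_cons]
    omega
  · simp

def find_repetitions_alt (dna_sequence : String) (min_length : Int) (max_length : Int) :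
    List (String × List Int) :=
  let seq := (PySem.Str.upper dna_sequence).toList
  let runs := pvRuns 0 seq
  let groups :=
    (PySem.List.pyRange min_length (max_length + 1) 1).foldl
      (fun d length =>
        runs.foldl
          (fun d r =>
            (PySem.List.pyRange 0 (PySem.List.len r.2 - length + 1) 1).foldl
              (fun d off =>
                pvEmit d
                  (String.ofList (PySem.List.slice r.2 (some off) (some (off + length))))
                  (r.1 + off)) d) d)
      PySem.Dict.empty
  pvFilterLong groups

-- ===== PRECONDITION & SPEC =====
-- Pre_ excludes only NON-POSITIVE pattern lengths (min_length ≤ 0 with min_length ≤ max_length),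
-- outside the function's natural domain: there Python's empty/negative slices make both outputs
-- accidental artefacts (A records zero-length "patterns" at every index, B only inside runs).
def Pre_find_repetitions (dna_sequence : String) (min_length : Int) (max_length : Int) : Prop :=
  1 ≤ min_length ∨ max_length < min_length
instance (dna_sequence : String) (min_length : Int) (max_length : Int) : Decidable (Pre_find_repetitions dna_sequence min_length max_length) := by unfold Pre_find_repetitions; infer_instance

def pvWitness_find_repetitions : String × Int × Int := ("ATgATxATGATG", 2, 3)

def Spec_find_repetitions (dna_sequence : String) (min_length : Int) (max_length : Int) (out : List (String × List Int)) : Prop := out = find_repetitions_alt dna_sequence min_length max_length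
instance (dna_sequence : String) (min_length : Int) (max_length : Int) (out : List (String × List Int)) : Decidable (Spec_find_repetitions dna_sequence min_length max_length out) := by unfold Spec_find_repetitions; infer_instance

-- ===== CLAIM (what is proved, stated in full; the proofs are below) =====
def Claim_equal_find_repetitions : Prop := ∀ (dna_sequence : String) (min_length : Int) (max_length : Int), Dom_find_repetitions dna_sequence min_length max_length → Pre_find_repetitions dna_sequence min_length max_length → Spec_find_repetitions dna_sequence min_length max_length (find_repetitions dna_sequence min_length max_length)

-- ===== LEMMAS AND PROOFS =====

-- the window of length L at index i (proof-side name for the slice both programs take)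
def pvWin (cs : List Char) (L i : Nat) : List Char := (cs.drop i).take L

-- a window that fits inside the left part of an append reads only the left part
theorem pvWin_left (t rest : List Char) (L i : Nat) (h : i + L ≤ t.length) :
    pvWin (t ++ rest) L i = pvWin t L i := by
  unfold pvWin
  rw [List.drop_append_of_le_length (by omega), List.take_append]
  simp [show L - (t.length - i) = 0 by omega]

-- a window starting at or after the left part reads only the right part
theorem pvWin_right (t rest : List Char) (L v : Nat) :
    pvWin (t ++ rest) L (t.length + v) = pvWin rest L v := by
  unfold pvWin
  rw [List.drop_append]
  simp [List.drop_eq_nil_of_le (by omega : t.length ≤ t.length + v),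
    show t.length + v - t.length = v by omega]

-- a window inside an all-valid run is all-valid
theorem pvWin_all (t : List Char) (L i : Nat) (ht : ∀ x ∈ t, pvValid x = true) :
    (pvWin t L i).all pvValid = true := by
  unfold pvWin
  exact List.all_eq_true.mpr fun x hx =>
    ht x (List.mem_of_mem_drop (List.mem_of_mem_take hx))

-- a window that straddles the boundary contains the invalid boundary character
theorem pvWin_mid (t : List Char) (x : Char) (xs : List Char) (L i : Nat)
    (hx : pvValid x = false) (h1 : i ≤ t.length) (h2 : t.length < i + L) :
    (pvWin (t ++ x :: xs) L i).all pvValid = false := by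
  unfold pvWin
  rw [List.drop_append_of_le_length (by omega), List.take_append]
  obtain ⟨w, hw⟩ : ∃ w, L - (t.drop i).length = w + 1 :=
    ⟨L - (t.drop i).length - 1, by simp [List.length_drop]; omega⟩
  rw [hw]
  simp [List.all_append, hx]

-- if dropWhile produces a cons, its head fails the predicate
theorem pvDropWhile_head (p : Char → Bool) (l : List Char) (x : Char) (xs : List Char)
    (h : l.dropWhile p = x :: xs) : p x = false := by
  induction l with
  | nil => simp at h
  | cons a as ih =>
    rw [List.dropWhile_cons] at h
    by_cases ha : p a
    · simp [ha] at h; exact ih h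
    · simp [ha] at h; simpa [← h.1] using ha

-- the split lemma: windows over t ++ rest (t all-valid, rest empty or starting invalid)
-- are the windows inside t followed by the windows over rest, shifted
theorem pvSplit (L0 j : Nat) (t rest : List Char)
    (ht : ∀ x ∈ t, pvValid x = true)
    (hr : ∀ x xs, rest = x :: xs → pvValid x = false) :
    ((List.range ((t ++ rest).length + 1 - (L0 + 1))).filter
        (fun i => (pvWin (t ++ rest) (L0 + 1) i).all pvValid)).map
      (fun i => (String.ofList (pvWin (t ++ rest) (L0 + 1) i), ((j : Int) + (i : Int))))
    = (List.range (t.length + 1 - (L0 + 1))).map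
        (fun off => (String.ofList (pvWin t (L0 + 1) off), (j : Int) + (off : Int)))
      ++ ((List.range (rest.length + 1 - (L0 + 1))).filter
          (fun i => (pvWin rest (L0 + 1) i).all pvValid)).map
        (fun i => (String.ofList (pvWin rest (L0 + 1) i),
          (((j + t.length : Nat) : Int) + (i : Int)))) := by
  cases rest with
  | nil =>
    simp only [List.append_nil, List.length_nil]
    rw [show 0 + 1 - (L0 + 1) = 0 by omega,
      List.filter_eq_self.mpr (fun i _ => pvWin_all t (L0 + 1) i ht)]
    simp
  | cons x xs =>
    have hx : pvValid x = false := hr x xs rfl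
    have hM : (t ++ x :: xs).length + 1 - (L0 + 1)
        = (t.length + 1 - (L0 + 1))
          + ((min t.length (t.length + xs.length + 2 - (L0 + 1)) - (t.length + 1 - (L0 + 1)))
             + ((x :: xs).length + 1 - (L0 + 1))) := by
      simp only [List.length_append, List.length_cons]; omega
    rw [hM, List.range_add, List.range_add, List.map_append, List.map_map,
      List.filter_append, List.filter_append, List.map_append, List.map_append]
    have hG1f : List.filter (fun i => (pvWin (t ++ x :: xs) (L0 + 1) i).all pvValid)
        (List.range (t.length + 1 - (L0 + 1))) = List.range (t.length + 1 - (L0 + 1)) := by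
      refine List.filter_eq_self.mpr (fun i hi => ?_)
      have hi' := List.mem_range.mp hi
      rw [pvWin_left t _ _ _ (by omega)]
      exact pvWin_all t (L0 + 1) i ht
    have hG2 : List.filter (fun i => (pvWin (t ++ x :: xs) (L0 + 1) i).all pvValid)
        (List.map (fun u => (t.length + 1 - (L0 + 1)) + u)
          (List.range (min t.length (t.length + xs.length + 2 - (L0 + 1)) - (t.length + 1 - (L0 + 1))))) = [] := by
      rw [List.filter_map]
      refine List.map_eq_nil_iff.mpr (List.filter_eq_nil_iff.mpr (fun u hu => ?_))
      have hu' := List.mem_range.mp hu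
      simp only [Function.comp_apply]
      rw [pvWin_mid t x xs _ _ hx (by omega) (by omega)]
      simp
    have hG3 : ∀ v ∈ List.range ((x :: xs).length + 1 - (L0 + 1)),
        (t.length + 1 - (L0 + 1)) + ((min t.length (t.length + xs.length + 2 - (L0 + 1)) - (t.length + 1 - (L0 + 1))) + v)
        = t.length + v := by
      intro v hv
      have hv' := List.mem_range.mp hv
      simp only [List.length_cons] at hv'
      omega
    rw [hG1f, hG2]
    simp only [List.map_nil, List.nil_append]
    refine congrArg₂ (· ++ ·) ?_ ?_
    · refine List.map_congr_left (fun i hi => ?_)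
      have hi' := List.mem_range.mp hi
      rw [pvWin_left t _ _ _ (by omega)]
    · rw [List.filter_map, List.map_map]
      rw [List.filter_congr (fun v hv => by
        simp only [Function.comp_apply]
        rw [hG3 v hv, pvWin_right t (x :: xs) (L0 + 1) v])]
      refine List.map_congr_left (fun v hv => ?_)
      simp only [Function.comp_apply]
      rw [hG3 v (List.mem_of_mem_filter hv), pvWin_right t (x :: xs) (L0 + 1) v]
      refine Prod.ext rfl ?_
      push_cast
      ring

-- the crux: the valid windows of cs with their positions are exactly the windows
-- inside the maximal runs produced by pvRuns
theorem pvCrux (L0 j : Nat) (cs : List Char) :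
    ((List.range (cs.length + 1 - (L0 + 1))).filter
        (fun i => (pvWin cs (L0 + 1) i).all pvValid)).map
      (fun i => (String.ofList (pvWin cs (L0 + 1) i), ((j : Int) + (i : Int))))
    = (pvRuns j cs).flatMap (fun r =>
        (List.range (r.2.length + 1 - (L0 + 1))).map
          (fun off => (String.ofList (pvWin r.2 (L0 + 1) off), r.1 + (off : Int)))) := by
  induction j, cs using pvRuns.induct with
  | case1 j =>
    rw [pvRuns]
    simp
  | case2 j c cs h ih =>
    conv_lhs => rw [← List.takeWhile_append_dropWhile (p := pvValid) (l := c :: cs)]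
    rw [pvSplit L0 j _ _ (fun x hx => List.mem_takeWhile_imp hx)
        (fun x xs hxx => pvDropWhile_head pvValid (c :: cs) x xs hxx), ih]
    rw [pvRuns]
    simp [h]
  | case3 j c cs h ih =>
    rw [pvRuns]
    simp only [h, Bool.false_eq_true, dite_false]
    rw [← ih]
    by_cases hle : L0 + 1 ≤ cs.length + 1
    · rw [show (c :: cs).length + 1 - (L0 + 1) = (cs.length + 1 - (L0 + 1)) + 1 by
        simp; omega]
      rw [List.range_succ_eq_map, List.filter_cons,
        show (pvWin (c :: cs) (L0 + 1) 0).all pvValid = false by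
          simp [pvWin, List.all_cons, h]]
      simp only [Bool.false_eq_true, if_false, List.filter_map]
      rw [List.filter_congr (fun i _ => by
        simp only [Function.comp_apply, Nat.succ_eq_add_one]
        rw [show pvWin (c :: cs) (L0 + 1) (i + 1) = pvWin cs (L0 + 1) i by
          simp [pvWin]])]
      rw [List.map_map]
      refine List.map_congr_left (fun i _ => ?_)
      simp only [Function.comp_apply, Nat.succ_eq_add_one]
      rw [show pvWin (c :: cs) (L0 + 1) (i + 1) = pvWin cs (L0 + 1) i by simp [pvWin]]
      refine Prod.ext rfl ?_
      push_cast
      ring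
    · rw [show (c :: cs).length + 1 - (L0 + 1) = 0 by simp; omega,
        show cs.length + 1 - (L0 + 1) = 0 by omega]
      simp

-- folding pvEmit over computed keys/positions is folding it over the list of pairs
theorem pvFoldPairs {β : Type} (l : List β) (key : β → String) (pos : β → Int)
    (d : PySem.Dict String (List Int)) :
    l.foldl (fun d i => pvEmit d (key i) (pos i)) d
    = (l.map (fun i => (key i, pos i))).foldl (fun d p => pvEmit d p.1 p.2) d := by
  rw [List.foldl_map]

-- A's loop body, at a natural index, is an if-guarded pvEmit
theorem pvStepA_nat (cs : List Char) (L' : Nat) (d : PySem.Dict String (List Int)) (i : Nat) :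
    pvStepA cs (L' : Int) d (i : Int)
    = if (pvWin cs L' i).all pvValid then
        pvEmit d (String.ofList (pvWin cs L' i)) (i : Int)
      else d := by
  simp only [pvStepA, pvEmit, pvWin, PySem.List.slice_natCast_add]
  by_cases hall : (List.take L' (List.drop i cs)).all pvValid
  · simp only [hall, if_true]
    by_cases hc : d.contains (String.ofList (List.take L' (List.drop i cs)))
    · rw [PySem.Dict.setdefault_of_contains _ _ hc, if_pos hc]
    · rw [PySem.Dict.setdefault_of_not_contains _ _ (by simpa using hc), if_neg hc]
  · simp [hall]

-- the per-length equality of the two inner loops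
theorem pvPerL (cs : List Char) (L : Int) (hL : 1 ≤ L) (d : PySem.Dict String (List Int)) :
    (PySem.List.pyRange 0 ((cs.length : Int) - L + 1) 1).foldl (pvStepA cs L) d
    = (pvRuns 0 cs).foldl
        (fun d r =>
          (PySem.List.pyRange 0 (PySem.List.len r.2 - L + 1) 1).foldl
            (fun d off =>
              pvEmit d (String.ofList (PySem.List.slice r.2 (some off) (some (off + L))))
                (r.1 + off)) d) d := by
  obtain ⟨L0, rfl⟩ : ∃ L0 : Nat, L = ((L0 + 1 : Nat) : Int) := ⟨(L - 1).toNat, by push_cast; omega⟩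
  have hRange : ∀ N : Nat, PySem.List.pyRange 0 ((N : Int) - ((L0 + 1 : Nat) : Int) + 1) 1
      = (List.range (N + 1 - (L0 + 1))).map (fun k : Nat => (k : Int)) := by
    intro N
    rw [PySem.List.pyRange_one]
    have : ((N : Int) - ((L0 + 1 : Nat) : Int) + 1 - 0).toNat = N + 1 - (L0 + 1) := by
      push_cast; omega
    rw [this]
    simp
  rw [hRange cs.length, List.foldl_map,
    PySem.List.foldl_congr_mem _ _ _ _ (fun d' k _ => pvStepA_nat cs (L0 + 1) d' k),
    PySem.List.foldl_if_eq_foldl_filter,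
    pvFoldPairs _ (fun i => String.ofList (pvWin cs (L0 + 1) i)) (fun i : Nat => (i : Int))]
  have hcrux := pvCrux L0 0 cs
  simp only [Nat.cast_zero, zero_add] at hcrux
  rw [hcrux, List.foldl_flatMap]
  refine PySem.List.foldl_congr_mem _ _ _ _ (fun d' r _ => ?_)
  rw [PySem.List.len_eq, hRange r.2.length]
  conv_rhs => rw [List.foldl_map]
  conv_lhs => rw [List.foldl_map]
  refine PySem.List.foldl_congr_mem _ _ _ _ (fun acc o _ => ?_)
  simp only [PySem.List.slice_natCast_add, pvWin]

-- ===== VERDICT (by name: the statement is the Claim_ definition above) =====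
theorem find_repetitions_spec : Claim_equal_find_repetitions := by
  intro ds mn mx _hdom hpre
  unfold Spec_find_repetitions find_repetitions find_repetitions_alt
  dsimp only
  rw [PySem.List.len_eq]
  rcases hpre with hmn | hlt
  · refine congrArg pvFilterLong ?_
    refine PySem.List.foldl_congr_mem _ _ _ _ (fun d L hLmem => ?_)
    have hLr : mn ≤ L ∧ L < mx + 1 := (PySem.List.mem_pyRange_one).mp hLmem
    exact pvPerL _ L (by omega) d
  · rw [PySem.List.pyRange_one_eq_nil (by omega)]
    rfl
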